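-- pv_equiv track=rewrite | github.com/eoinlane/knowledgebase-pipeline | mac/build_contacts_db.py | parse_people_field
-- ===== SOURCE A (Python) =====
-- def parse_people_field(people_field):
--     """Handle both ["Name1", "Name2"] and ["Name1, Name2, Name3"] YAML formats."""
--     if not people_field:
--         return []
--     skip = {"eoin lane", "eoin", "owen lane", "owen", ""}
--     names = []
--     for entry in people_field:
--         if not isinstance(entry, str):
--             continue
--         for name in entry.split(","):
--             name = name.strip()
--             if name.lower() not in skip:
--                 names.append(name)
--     return names
-- ===== SOURCE B (Python) =====
-- def parse_people_field(people_field):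
--     """Single character-level scan per entry: a hand-rolled tokenizer that splits on ','
--     and trims whitespace on the fly (no str.split/str.strip), filtering against the skip set."""
--     skip = {"eoin lane", "eoin", "owen lane", "owen", ""}
--     names = []
--     for entry in people_field:
--         if not isinstance(entry, str):
--             continue
--         buf = []
--         trail = 0  # number of trailing-whitespace chars currently at the end of buf
--         for ch in entry:
--             if ch == ",":
--                 token = "".join(buf[:len(buf) - trail])
--                 if token.lower() not in skip:
--                     names.append(token)
--                 buf = []
--                 trail = 0
--             elif ch.isspace():
--                 if buf:  # leading whitespace is never buffered
--                     buf.append(ch)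
--                     trail += 1
--             else:
--                 buf.append(ch)
--                 trail = 0
--         token = "".join(buf[:len(buf) - trail])
--         if token.lower() not in skip:
--             names.append(token)
--     return names
-- ===== Notes on version B (the rewrite author's own statement) =====
-- stated objective: alternative
-- what changed: A's per-entry str.split(',') followed by str.strip on every piece is replaced by a hand-rolled single character-level scanner: one pass over the entry's characters maintains a token buffer and a trailing-whitespace counter, emitting a trimmed token at each comma (no split, no strip).
import Mathlib
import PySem

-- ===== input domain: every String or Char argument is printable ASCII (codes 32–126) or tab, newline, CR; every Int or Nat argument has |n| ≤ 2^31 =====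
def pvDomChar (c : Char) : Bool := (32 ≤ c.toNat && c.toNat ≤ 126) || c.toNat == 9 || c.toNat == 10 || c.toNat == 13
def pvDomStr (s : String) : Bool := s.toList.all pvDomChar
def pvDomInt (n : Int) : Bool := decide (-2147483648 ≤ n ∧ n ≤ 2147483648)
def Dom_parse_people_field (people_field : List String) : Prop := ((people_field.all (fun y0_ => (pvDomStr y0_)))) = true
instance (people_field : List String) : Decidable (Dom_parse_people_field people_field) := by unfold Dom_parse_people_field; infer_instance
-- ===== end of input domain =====

-- B replaces A's per-entry split(',')+strip-each-piece passes by a hand-rolled single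
-- character-level scanner that trims whitespace on the fly (alternative algorithm, same cost).

-- ===== PORT A =====
-- the skip set {"eoin lane", "eoin", "owen lane", "owen", ""}
def pvSkip : PySem.Set String :=
  PySem.Set.ofList ["eoin lane", "eoin", "owen lane", "owen", ""]

-- literal port of A; `isinstance(entry, str)` is always true under the List String convention
def parse_people_field (people_field : List String) : List String :=
  if people_field = [] then []
  else
    people_field.foldl (fun names entry =>
      (PySem.Chars.splitOn entry.toList [',']).foldl (fun names piece =>
        let name := String.ofList (PySem.Chars.strip piece)
        if !(PySem.Set.contains pvSkip (PySem.Str.lower name)) then names ++ [name] else names)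
        names) []

-- ===== PORT B =====
-- flush: `token = "".join(buf[:len(buf)-trail]); if token.lower() not in skip: names.append(token)`
def pvFlush (buf : List Char) (trail : Nat) (names : List String) : List String :=
  let token := String.ofList (buf.take (buf.length - trail))
  if !(PySem.Set.contains pvSkip (PySem.Str.lower token)) then names ++ [token] else names

-- one character of B's scanner loop (state = (buf, trail, names)); `ch.isspace()` is PySem.Chars.isspace
def pvScanStep (st : List Char × Nat × List String) (ch : Char) : List Char × Nat × List String :=
  let (buf, trail, names) := st
  if ch = ',' then ([], 0, pvFlush buf trail names)
  else if PySem.Chars.isspace ch then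
    (if buf = [] then (buf, trail, names) else (buf ++ [ch], trail + 1, names))
  else (buf ++ [ch], 0, names)

def parse_people_field_alt (people_field : List String) : List String :=
  people_field.foldl (fun names entry =>
    let st := entry.toList.foldl pvScanStep ([], 0, names)
    pvFlush st.1 st.2.1 st.2.2) []

-- ===== PRECONDITION & SPEC =====
def Spec_parse_people_field (people_field : List String) (out : List String) : Prop := out = parse_people_field_alt people_field
instance (people_field : List String) (out : List String) : Decidable (Spec_parse_people_field people_field out) := by unfold Spec_parse_people_field; infer_instance

-- ===== CLAIM (what is proved, stated in full; the proofs are below) =====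
def Claim_equal_parse_people_field : Prop := ∀ (people_field : List String), Dom_parse_people_field people_field → Spec_parse_people_field people_field (parse_people_field people_field)

-- ===== LEMMAS AND PROOFS =====

-- structural model of splitting a char list on ','
def pvSplit : List Char → List (List Char)
  | [] => [[]]
  | c :: rest =>
    if c = ',' then [] :: pvSplit rest
    else
      match pvSplit rest with
      | [] => [[c]]
      | p :: ps => (c :: p) :: ps

theorem pvSplit_ne_nil (l : List Char) : pvSplit l ≠ [] := by
  cases l with
  | nil => simp [pvSplit]
  | cons c rest =>
    simp only [pvSplit]
    split
    · simp
    · cases h : pvSplit rest <;> simp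

theorem pvGo_spec (l : List Char) : ∀ (fuel : Nat) (cur : List Char) (acc : List (List Char)),
    l.length < fuel →
    PySem.Chars.splitOn.go [','] fuel l cur acc =
      acc.reverse ++ (match pvSplit l with
        | [] => []
        | p :: ps => (cur.reverse ++ p) :: ps) := by
  induction l with
  | nil =>
    intro fuel cur acc h
    match fuel with
    | fuel + 1 => simp [PySem.Chars.splitOn.go, pvSplit]
  | cons c rest ih =>
    intro fuel cur acc h
    match fuel with
    | fuel + 1 =>
      simp only [PySem.Chars.splitOn.go]
      by_cases hc : c = ','
      · subst hc
        have hp : [','].isPrefixOf (',' :: rest) = true := by simp [List.isPrefixOf]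
        simp only [hp, if_pos]
        have hd : List.drop [','].length (',' :: rest) = rest := rfl
        rw [hd, ih fuel [] (cur.reverse :: acc) (by simp at h; omega)]
        simp only [pvSplit, reduceIte]
        cases hr : pvSplit rest with
        | nil => exact absurd hr (pvSplit_ne_nil rest)
        | cons p ps => simp
      · have hp : [','].isPrefixOf (c :: rest) = false := by
          simp [List.isPrefixOf]; intro hcc; exact hc hcc.symm
        simp only [hp, Bool.false_eq_true, if_false]
        rw [ih fuel (c :: cur) acc (by simp at h ⊢; omega)]
        simp only [pvSplit, if_neg hc]
        cases hr : pvSplit rest with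
        | nil => exact absurd hr (pvSplit_ne_nil rest)
        | cons p ps => simp

theorem pvSplitOn_eq (l : List Char) : PySem.Chars.splitOn l [','] = pvSplit l := by
  unfold PySem.Chars.splitOn
  rw [pvGo_spec l (l.length + 1) [] [] (by omega)]
  cases hr : pvSplit l with
  | nil => exact absurd hr (pvSplit_ne_nil l)
  | cons p ps => simp

-- the scanner's state transition on a non-comma character, names dropped
def pvStep2 (st : List Char × Nat) (c : Char) : List Char × Nat :=
  if PySem.Chars.isspace c then
    (if st.1 = [] then st else (st.1 ++ [c], st.2 + 1))
  else (st.1 ++ [c], 0)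

-- the buffer/trail state after scanning a comma-free piece from the empty state
theorem pvExtend_inv (p : List Char) :
    p.foldl pvStep2 ([], 0) =
      (p.dropWhile PySem.Chars.isspace,
       (((p.dropWhile PySem.Chars.isspace).reverse.takeWhile PySem.Chars.isspace).length)) := by
  induction p using List.reverseRecOn with
  | nil => simp
  | append_singleton p c ih =>
    rw [List.foldl_append, List.foldl_cons, List.foldl_nil, ih]
    by_cases hs : PySem.Chars.isspace c
    · by_cases hd : p.dropWhile PySem.Chars.isspace = []
      · have hall : ∀ x ∈ p, PySem.Chars.isspace x = true := by
          simpa [List.dropWhile_eq_nil_iff] using hd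
        have : (p ++ [c]).dropWhile PySem.Chars.isspace = [] := by
          simp only [List.dropWhile_eq_nil_iff]
          intro x hx
          rcases List.mem_append.mp hx with h | h
          · exact hall x h
          · simp at h; subst h; exact hs
        simp [pvStep2, hs, hd, this]
      · have hdw : (p ++ [c]).dropWhile PySem.Chars.isspace =
            p.dropWhile PySem.Chars.isspace ++ [c] := by
          rw [List.dropWhile_append]
          simp [hd]
        simp only [pvStep2, hs, if_pos, hd, ite_false, hdw]
        simp [hs]
    · have hdw : (p ++ [c]).dropWhile PySem.Chars.isspace =
          p.dropWhile PySem.Chars.isspace ++ [c] := by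
        rw [List.dropWhile_append]
        by_cases hd : p.dropWhile PySem.Chars.isspace = [] <;> simp [hd, hs]
      simp [pvStep2, hs, hdw]

-- dropping the counted trailing whitespace from the buffer is exactly rstrip
theorem pvTake_trail (d : List Char) :
    d.take (d.length - (d.reverse.takeWhile PySem.Chars.isspace).length) =
      PySem.Chars.rstrip d := by
  obtain ⟨A, B, hd, hA, hB⟩ :
      ∃ A B : List Char, d = A ++ B ∧
        A = (d.reverse.dropWhile PySem.Chars.isspace).reverse ∧
        B = (d.reverse.takeWhile PySem.Chars.isspace).reverse :=
    ⟨_, _, by rw [← List.reverse_append, List.takeWhile_append_dropWhile, List.reverse_reverse],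
      rfl, rfl⟩
  have htw : d.reverse.takeWhile PySem.Chars.isspace = B.reverse := by
    rw [hB, List.reverse_reverse]
  have hrs : PySem.Chars.rstrip d = A := by
    unfold PySem.Chars.rstrip; rw [← hA]
  rw [htw, hrs]
  conv_lhs => rw [hd]
  simp only [List.length_append, List.length_reverse, Nat.add_sub_cancel, List.take_left]

-- A's processing of one split piece
def pvInner (names : List String) (piece : List Char) : List String :=
  let name := String.ofList (PySem.Chars.strip piece)
  if !(PySem.Set.contains pvSkip (PySem.Str.lower name)) then names ++ [name] else names

-- flushing the state obtained by scanning a piece from empty = A's strip-and-filter on it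
theorem pvFlush_extend (q : List Char) (names : List String) :
    pvFlush (q.foldl pvStep2 ([], 0)).1 (q.foldl pvStep2 ([], 0)).2 names = pvInner names q := by
  rw [pvExtend_inv]
  unfold pvFlush pvInner
  rw [pvTake_trail]
  rfl

-- a non-comma character acts on the scanner state as pvStep2, leaving names unchanged
theorem pvScanStep_ne (buf : List Char) (trail : Nat) (names : List String) (c : Char)
    (hc : c ≠ ',') :
    pvScanStep (buf, trail, names) c = ((pvStep2 (buf, trail) c).1, (pvStep2 (buf, trail) c).2, names) := by
  simp only [pvScanStep, pvStep2, if_neg hc]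
  by_cases hs : PySem.Chars.isspace c
  · by_cases hb : buf = [] <;> simp [hs, hb]
  · simp [hs]

-- the scanner over a whole entry = A's piece loop over pvSplit, threaded from a general state
theorem pvScan_spec (l : List Char) : ∀ (buf : List Char) (trail : Nat) (names : List String),
    pvFlush (l.foldl pvScanStep (buf, trail, names)).1
        (l.foldl pvScanStep (buf, trail, names)).2.1
        (l.foldl pvScanStep (buf, trail, names)).2.2 =
      (match pvSplit l with
       | [] => []
       | p :: ps =>
         ps.foldl pvInner
           (pvFlush (p.foldl pvStep2 (buf, trail)).1 (p.foldl pvStep2 (buf, trail)).2 names)) := by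
  induction l with
  | nil => intro buf trail names; simp [pvSplit]
  | cons c rest ih =>
    intro buf trail names
    by_cases hc : c = ','
    · subst hc
      have hstep : pvScanStep (buf, trail, names) ',' = ([], 0, pvFlush buf trail names) := rfl
      rw [List.foldl_cons, hstep, ih [] 0 (pvFlush buf trail names)]
      simp only [pvSplit, reduceIte]
      cases hr : pvSplit rest with
      | nil => exact absurd hr (pvSplit_ne_nil rest)
      | cons q qs =>
        simp only [List.foldl_cons, List.foldl_nil, pvFlush_extend]
    · rw [List.foldl_cons, pvScanStep_ne buf trail names c hc,
        ih (pvStep2 (buf, trail) c).1 (pvStep2 (buf, trail) c).2 names]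
      simp only [pvSplit, if_neg hc]
      cases hr : pvSplit rest with
      | nil => exact absurd hr (pvSplit_ne_nil rest)
      | cons q qs => simp [List.foldl_cons]

-- per entry, B's scanner equals A's piece loop
theorem pvEntry_eq (names : List String) (entry : String) :
    pvFlush (entry.toList.foldl pvScanStep ([], 0, names)).1
        (entry.toList.foldl pvScanStep ([], 0, names)).2.1
        (entry.toList.foldl pvScanStep ([], 0, names)).2.2 =
      (PySem.Chars.splitOn entry.toList [',']).foldl pvInner names := by
  rw [pvScan_spec, pvSplitOn_eq]
  cases hr : pvSplit entry.toList with
  | nil => exact absurd hr (pvSplit_ne_nil entry.toList)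
  | cons p ps => simp [List.foldl_cons, pvFlush_extend]

-- ===== VERDICT (by name: the statement is the Claim_ definition above) =====
theorem parse_people_field_spec : Claim_equal_parse_people_field := by
  intro people_field _
  unfold Spec_parse_people_field parse_people_field parse_people_field_alt
  by_cases h : people_field = []
  · subst h; rfl
  · rw [if_neg h]
    have hfn : (fun (names : List String) (entry : String) =>
        (PySem.Chars.splitOn entry.toList [',']).foldl (fun names piece =>
          let name := String.ofList (PySem.Chars.strip piece)
          if !(PySem.Set.contains pvSkip (PySem.Str.lower name)) then names ++ [name] else names)
          names) =
        (fun (names : List String) (entry : String) =>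
          let st := entry.toList.foldl pvScanStep ([], 0, names)
          pvFlush st.1 st.2.1 st.2.2) := by
      funext names entry
      exact (pvEntry_eq names entry).symm
    rw [hfn]
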